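-- pv_equiv track=rewrite | github.com/oleg-kachan/tda_hse2026 | lecture6/simplicialx/simplets.py | is_antichain
-- ===== SOURCE A (Python) =====
-- import typing as tp
--
-- def is_antichain(simplices: tp.Sequence[tp.Sequence[int]]) -> bool:
--     simplices_sets = [set(simplex) for simplex in simplices]
--     for i in range(len(simplices)):
--         for j in range(i+1, len(simplices)):
--             if simplices_sets[i] <= simplices_sets[j]:
--                 return False
--             if simplices_sets[j] <= simplices_sets[i]:
--                 return False
--     return True
-- ===== SOURCE B (Python) =====
-- def is_antichain(simplices):
--     # Sort the simplex-sets by increasing cardinality, then scan each set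
--     # against the previously seen (no-larger) sets in one direction only:
--     # a containment s <= t with |s| <= |t| is the only kind that can exist.
--     sets = sorted((set(s) for s in simplices), key=len)
--     seen = []
--     for t in sets:
--         for s in seen:
--             if s <= t:
--                 return False
--         seen.append(t)
--     return True
-- ===== Notes on version B (the rewrite author's own statement) =====
-- stated objective: alternative
-- what changed: B sorts the simplex-sets by cardinality and then checks containment in one direction only (each set against the previously seen, no-larger sets), replacing A's index-based all-pairs scan that tests both directions.
import Mathlib
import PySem

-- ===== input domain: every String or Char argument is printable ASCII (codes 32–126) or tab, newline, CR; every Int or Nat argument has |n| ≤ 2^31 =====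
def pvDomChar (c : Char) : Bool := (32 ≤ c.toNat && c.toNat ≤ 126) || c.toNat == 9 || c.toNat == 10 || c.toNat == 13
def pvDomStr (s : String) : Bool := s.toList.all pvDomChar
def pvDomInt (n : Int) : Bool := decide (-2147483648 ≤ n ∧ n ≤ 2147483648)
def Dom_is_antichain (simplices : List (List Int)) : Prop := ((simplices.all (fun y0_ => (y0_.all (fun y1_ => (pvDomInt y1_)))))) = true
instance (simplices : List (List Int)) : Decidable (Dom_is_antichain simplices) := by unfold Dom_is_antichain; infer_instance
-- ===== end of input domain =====

-- B replaces A's two-direction all-pairs index scan by a cardinality sort followed by a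
-- one-direction scan of each set against the previously seen sets ("alternative" objective).

-- ===== PORT A =====
-- inner loop: for j in range(i+1, n): two ifs, early return False
def aInner (sets : List (PySem.Set Int)) (n i j : Nat) : Bool :=
  if j < n then
    if PySem.Set.issubset (sets.getD i []) (sets.getD j []) then false
    else if PySem.Set.issubset (sets.getD j []) (sets.getD i []) then false
    else aInner sets n i (j + 1)
  else true
termination_by n - j

-- outer loop: for i in range(n)
def aOuter (sets : List (PySem.Set Int)) (n i : Nat) : Bool :=
  if i < n then
    if aInner sets n i (i + 1) then aOuter sets n (i + 1) else false
  else true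
termination_by n - i

def is_antichain (simplices : List (List Int)) : Bool :=
  let simplices_sets := simplices.map (fun simplex => PySem.Set.ofList simplex)
  aOuter simplices_sets simplices.length 0

-- ===== PORT B =====
-- for t in sets: for s in seen: if s <= t: return False; seen.append(t)
def bLoop (seen : List (PySem.Set Int)) (rest : List (PySem.Set Int)) : Bool :=
  match rest with
  | [] => true
  | t :: rs =>
    if seen.any (fun s => PySem.Set.issubset s t) then false
    else bLoop (seen ++ [t]) rs

def is_antichain_alt (simplices : List (List Int)) : Bool :=
  let sets := PySem.List.sorted (simplices.map (fun s => PySem.Set.ofList s))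
      (fun s => PySem.Set.len s) false
  bLoop [] sets

-- ===== PRECONDITION & SPEC =====
def Spec_is_antichain (simplices : List (List Int)) (out : Bool) : Prop := out = is_antichain_alt simplices
instance (simplices : List (List Int)) (out : Bool) : Decidable (Spec_is_antichain simplices out) := by unfold Spec_is_antichain; infer_instance

-- ===== CLAIM (what is proved, stated in full; the proofs are below) =====
def Claim_equal_is_antichain : Prop := ∀ (simplices : List (List Int)), Dom_is_antichain simplices → Spec_is_antichain simplices (is_antichain simplices)

-- ===== LEMMAS AND PROOFS =====

-- A's symmetric "no containment either way" relation, as a Prop on element lists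
def NoCont (a b : PySem.Set Int) : Prop := ¬ a ⊆ b ∧ ¬ b ⊆ a

theorem noCont_symm {a b : PySem.Set Int} (h : NoCont a b) : NoCont b a := ⟨h.2, h.1⟩

theorem aInner_iff (sets : List (PySem.Set Int)) (n i j : Nat) :
    aInner sets n i j = true ↔
      ∀ k, j ≤ k → k < n → NoCont (sets.getD i []) (sets.getD k []) := by
  induction' hw : n - j with m ih generalizing j
  · rw [aInner]
    have hj : ¬ j < n := by omega
    rw [if_neg hj]
    simp only [true_iff]
    omega
  · rw [aInner]
    have hj : j < n := by omega
    rw [if_pos hj]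
    by_cases h1 : PySem.Set.issubset (sets.getD i []) (sets.getD j []) = true
    · rw [if_pos h1]
      simp only [Bool.false_eq_true, false_iff]
      intro h
      exact (h j le_rfl hj).1 ((PySem.Set.issubset_iff _ _).mp h1)
    · rw [if_neg h1]
      by_cases h2 : PySem.Set.issubset (sets.getD j []) (sets.getD i []) = true
      · rw [if_pos h2]
        simp only [Bool.false_eq_true, false_iff]
        intro h
        exact (h j le_rfl hj).2 ((PySem.Set.issubset_iff _ _).mp h2)
      · rw [if_neg h2, ih (j + 1) (by omega)]
        have h1' : ¬ sets.getD i [] ⊆ sets.getD j [] :=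
          fun hs => h1 ((PySem.Set.issubset_iff _ _).mpr hs)
        have h2' : ¬ sets.getD j [] ⊆ sets.getD i [] :=
          fun hs => h2 ((PySem.Set.issubset_iff _ _).mpr hs)
        constructor
        · intro h k hk1 hk2
          rcases Nat.eq_or_lt_of_le hk1 with rfl | hlt
          · exact ⟨h1', h2'⟩
          · exact h k hlt hk2
        · intro h k hk1 hk2
          exact h k (by omega) hk2

theorem aOuter_iff (sets : List (PySem.Set Int)) (n i : Nat) :
    aOuter sets n i = true ↔
      ∀ p q, i ≤ p → p < q → q < n → NoCont (sets.getD p []) (sets.getD q []) := by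
  induction' hw : n - i with m ih generalizing i
  · rw [aOuter]
    have hi : ¬ i < n := by omega
    rw [if_neg hi]
    simp only [true_iff]
    omega
  · rw [aOuter]
    have hi : i < n := by omega
    rw [if_pos hi]
    by_cases h1 : aInner sets n i (i + 1) = true
    · rw [if_pos h1, ih (i + 1) (by omega)]
      rw [aInner_iff] at h1
      constructor
      · intro h p q hp hpq hq
        rcases Nat.eq_or_lt_of_le hp with rfl | hlt
        · exact h1 q hpq hq
        · exact h p q hlt hpq hq
      · intro h p q hp hpq hq
        exact h p q (by omega) hpq hq
    · rw [if_neg h1]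
      simp only [Bool.false_eq_true, false_iff]
      intro h
      exact h1 ((aInner_iff sets n i (i + 1)).mpr (fun k hk1 hk2 => h i k le_rfl hk1 hk2))

theorem a_iff (simplices : List (List Int)) :
    is_antichain simplices = true ↔
      List.Pairwise NoCont (simplices.map (fun s => PySem.Set.ofList s)) := by
  unfold is_antichain
  rw [aOuter_iff, List.pairwise_iff_getElem]
  have hlen : (simplices.map (fun s => PySem.Set.ofList s)).length = simplices.length := by
    simp
  constructor
  · intro h p q hp hq hpq
    have := h p q (Nat.zero_le _) hpq (by omega)
    rwa [List.getD_eq_getElem _ _ (by omega), List.getD_eq_getElem _ _ (by omega)] at this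
  · intro h p q _ hpq hq
    have := h p q (by omega) (by omega) hpq
    rwa [List.getD_eq_getElem _ _ (by omega), List.getD_eq_getElem _ _ (by omega)]

theorem bLoop_iff (rest seen : List (PySem.Set Int)) :
    bLoop seen rest = true ↔
      (∀ s ∈ seen, ∀ t ∈ rest, ¬ s ⊆ t) ∧
        List.Pairwise (fun s t => ¬ s ⊆ t) rest := by
  induction rest generalizing seen with
  | nil => simp [bLoop]
  | cons t rs ih =>
    rw [bLoop]
    by_cases h : seen.any (fun s => PySem.Set.issubset s t) = true
    · rw [if_pos h]
      simp only [Bool.false_eq_true, false_iff]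
      rw [List.any_eq_true] at h
      obtain ⟨s, hs, hsub⟩ := h
      intro hc
      exact hc.1 s hs t List.mem_cons_self ((PySem.Set.issubset_iff _ _).mp hsub)
    · rw [if_neg h, ih]
      have h' : ∀ s ∈ seen, ¬ s ⊆ t := fun s hs hsub =>
        h (List.any_eq_true.mpr ⟨s, hs, (PySem.Set.issubset_iff _ _).mpr hsub⟩)
      constructor
      · rintro ⟨h1, h2⟩
        refine ⟨?_, List.pairwise_cons.mpr ⟨?_, h2⟩⟩
        · intro s hs u hu
          rcases List.mem_cons.mp hu with rfl | hu
          · exact h' s hs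
          · exact h1 s (by simp [hs]) u hu
        · intro u hu
          exact h1 t (by simp) u hu
      · rintro ⟨h1, h2⟩
        rw [List.pairwise_cons] at h2
        refine ⟨?_, h2.2⟩
        intro s hs u hu
        rcases List.mem_append.mp hs with hs | hs
        · exact h1 s hs u (List.mem_cons_of_mem _ hu)
        · simp only [List.mem_singleton] at hs
          subst hs
          exact h2.1 u hu

-- on a cardinality-sorted list of nodup lists, the one-direction pairwise check
-- is equivalent to the symmetric one
theorem pairwise_onedir_iff_noCont (ys : List (PySem.Set Int))
    (hsort : List.Pairwise (fun a b => PySem.Set.len a ≤ PySem.Set.len b) ys)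
    (hnd : ∀ x ∈ ys, List.Nodup x) :
    List.Pairwise (fun s t => ¬ s ⊆ t) ys ↔ List.Pairwise NoCont ys := by
  constructor
  · intro h
    refine (hsort.and h).imp_of_mem ?_
    intro a b ha hb hab
    refine ⟨hab.2, ?_⟩
    intro hba
    have hlen : b.length ≤ a.length := ((hnd b hb).subperm hba).length_le
    have hlen2 : a.length ≤ b.length := by
      have := hab.1
      simp only [PySem.Set.len] at this
      omega
    have hperm : b.Perm a := ((hnd b hb).subperm hba).perm_of_length_le (by omega)
    exact hab.2 (hperm.symm.subset)
  · intro h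
    exact h.imp (fun hc => hc.1)

theorem b_iff (simplices : List (List Int)) :
    is_antichain_alt simplices = true ↔
      List.Pairwise NoCont (simplices.map (fun s => PySem.Set.ofList s)) := by
  unfold is_antichain_alt
  set sets := simplices.map (fun s => PySem.Set.ofList s) with hsets
  have hperm := PySem.List.sorted_perm sets (fun s => PySem.Set.len s) false
  rw [bLoop_iff]
  have hnd : ∀ x ∈ PySem.List.sorted sets (fun s => PySem.Set.len s) false, List.Nodup x := by
    intro x hx
    have hx' : x ∈ sets := hperm.mem_iff.mp hx
    rw [hsets, List.mem_map] at hx'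
    obtain ⟨s, _, rfl⟩ := hx'
    exact PySem.Set.nodup_ofList s
  rw [show (∀ s ∈ ([] : List (PySem.Set Int)), ∀ t ∈ PySem.List.sorted sets (fun s => PySem.Set.len s) false, ¬ s ⊆ t) ∧
      List.Pairwise (fun s t => ¬ s ⊆ t) (PySem.List.sorted sets (fun s => PySem.Set.len s) false) ↔
      List.Pairwise (fun s t => ¬ s ⊆ t) (PySem.List.sorted sets (fun s => PySem.Set.len s) false) by simp]
  rw [pairwise_onedir_iff_noCont _ (PySem.List.sorted_pairwise sets _) hnd]
  exact List.Perm.pairwise_iff (fun h => noCont_symm h) hperm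

-- ===== VERDICT (by name: the statement is the Claim_ definition above) =====
theorem is_antichain_spec : Claim_equal_is_antichain := by
  intro simplices _
  unfold Spec_is_antichain
  have ha := a_iff simplices
  have hb := b_iff simplices
  cases h1 : is_antichain simplices <;> cases h2 : is_antichain_alt simplices <;>
    simp_all
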